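-- pv_equiv track=rewrite | github.com/Cheroketo/python_practice | basics/two_Max_two_Min.py | two_Max_two_Min
-- ===== SOURCE A (Python) =====
-- def two_Max_two_Min(lst):
--     max1=max2=float('-inf')
--     min1=min2=float('inf')
--     for element in lst:
--         if element >max1:
--             max2 = max1
--             max1 = element
--         elif element > max2:
--             max2 = element
--     for element in lst:
--         if element <min1:
--             min2 = min1
--             min1 = element
--         elif element < min2:
--             min2 = element
--     return max1*max2 > min1+min2
-- ===== SOURCE B (Python) =====
-- def two_Max_two_Min(lst):
--     s = sorted(lst)
--     return s[-1] * s[-2] > s[0] + s[1]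
-- ===== Notes on version B (the rewrite author's own statement) =====
-- stated objective: simpler
-- what changed: Replaces the two sentinel-initialised scanning passes that track the two maxima and two minima with a single sort, reading the two maxima as the last two and the two minima as the first two sorted entries. Pre_ excludes lists of fewer than two elements, on which A's False is an artefact of its float-infinity sentinel arithmetic and B's sorted-indexing raises IndexError.
-- outside the precondition, e.g. on two_Max_two_Min([]): A returns False, B raises IndexError; on two_Max_two_Min([5]): A returns False, B raises IndexError
import Mathlib
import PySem

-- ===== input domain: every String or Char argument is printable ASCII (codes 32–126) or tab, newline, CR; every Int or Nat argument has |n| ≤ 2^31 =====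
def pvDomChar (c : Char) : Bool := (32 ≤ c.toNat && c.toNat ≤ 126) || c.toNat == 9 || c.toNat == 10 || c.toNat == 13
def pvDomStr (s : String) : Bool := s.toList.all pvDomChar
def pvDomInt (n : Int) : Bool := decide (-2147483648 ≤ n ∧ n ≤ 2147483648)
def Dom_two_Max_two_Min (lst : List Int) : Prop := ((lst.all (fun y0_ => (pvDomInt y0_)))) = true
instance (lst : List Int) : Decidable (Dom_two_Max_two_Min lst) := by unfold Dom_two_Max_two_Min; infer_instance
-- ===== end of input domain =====

-- B replaces A's two sentinel-initialised scans with one sort, reading the two maxima/minima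
-- off the ends of the sorted list (same cost class; simpler).

-- ===== PORT A =====
-- A's sentinels are the floats -inf/+inf; on int elements all float comparisons and the final
-- *,+,> are exact, so the port models the reachable float values exactly: an extended type with
-- ±inf and nan, with IEEE comparison/multiplication/addition on these cases.
inductive XF : Type
  | ninf : XF
  | pinf : XF
  | nan : XF
  | fin : Int → XF
deriving DecidableEq, Repr

def XF.gtb : XF → XF → Bool
  | XF.nan, _ => false
  | _, XF.nan => false
  | XF.ninf, _ => false
  | XF.pinf, XF.pinf => false
  | XF.pinf, _ => true
  | XF.fin _, XF.pinf => false
  | XF.fin _, XF.ninf => true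
  | XF.fin a, XF.fin b => decide (a > b)

-- Python's `x < y` on these values is `y > x` (both false when either is nan).
def XF.ltb (a b : XF) : Bool := XF.gtb b a

def XF.mul : XF → XF → XF
  | XF.nan, _ => XF.nan
  | _, XF.nan => XF.nan
  | XF.pinf, XF.pinf => XF.pinf
  | XF.pinf, XF.ninf => XF.ninf
  | XF.ninf, XF.pinf => XF.ninf
  | XF.ninf, XF.ninf => XF.pinf
  | XF.pinf, XF.fin b => if b > 0 then XF.pinf else if b < 0 then XF.ninf else XF.nan
  | XF.fin a, XF.pinf => if a > 0 then XF.pinf else if a < 0 then XF.ninf else XF.nan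
  | XF.ninf, XF.fin b => if b > 0 then XF.ninf else if b < 0 then XF.pinf else XF.nan
  | XF.fin a, XF.ninf => if a > 0 then XF.ninf else if a < 0 then XF.pinf else XF.nan
  | XF.fin a, XF.fin b => XF.fin (a * b)

def XF.add : XF → XF → XF
  | XF.nan, _ => XF.nan
  | _, XF.nan => XF.nan
  | XF.pinf, XF.ninf => XF.nan
  | XF.ninf, XF.pinf => XF.nan
  | XF.pinf, _ => XF.pinf
  | _, XF.pinf => XF.pinf
  | XF.ninf, _ => XF.ninf
  | _, XF.ninf => XF.ninf
  | XF.fin a, XF.fin b => XF.fin (a + b)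

-- first loop body: the max1/max2 update
def stepMax (s : XF × XF) (e : Int) : XF × XF :=
  if XF.gtb (XF.fin e) s.1 then (XF.fin e, s.1)
  else if XF.gtb (XF.fin e) s.2 then (s.1, XF.fin e)
  else s

-- second loop body: the min1/min2 update
def stepMin (s : XF × XF) (e : Int) : XF × XF :=
  if XF.ltb (XF.fin e) s.1 then (XF.fin e, s.1)
  else if XF.ltb (XF.fin e) s.2 then (s.1, XF.fin e)
  else s

def two_Max_two_Min (lst : List Int) : Bool :=
  let m := lst.foldl stepMax (XF.ninf, XF.ninf)
  let n := lst.foldl stepMin (XF.pinf, XF.pinf)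
  XF.gtb (XF.mul m.1 m.2) (XF.add n.1 n.2)

-- ===== PORT B =====
def two_Max_two_Min_alt (lst : List Int) : Bool :=
  let s := PySem.List.sorted lst (fun x => x) false
  match PySem.List.pyGet? s (-1), PySem.List.pyGet? s (-2),
        PySem.List.pyGet? s 0, PySem.List.pyGet? s 1 with
  | some a, some b, some c, some d => decide (a * b > c + d)
  | _, _, _, _ => false  -- IndexError in Python: outside Pre_

-- ===== PRECONDITION & SPEC =====
-- Pre_ excludes lists of fewer than two elements: A returns False there only through its
-- float-infinity sentinel arithmetic, while B's sorted-indexing raises IndexError.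
def Pre_two_Max_two_Min (lst : List Int) : Prop := 2 ≤ lst.length
instance (lst : List Int) : Decidable (Pre_two_Max_two_Min lst) := by unfold Pre_two_Max_two_Min; infer_instance
def pvWitness_two_Max_two_Min : List Int := [3, 1, 2]

def Spec_two_Max_two_Min (lst : List Int) (out : Bool) : Prop := out = two_Max_two_Min_alt lst
instance (lst : List Int) (out : Bool) : Decidable (Spec_two_Max_two_Min lst out) := by unfold Spec_two_Max_two_Min; infer_instance

-- ===== CLAIM (what is proved, stated in full; the proofs are below) =====
def Claim_equal_two_Max_two_Min : Prop := ∀ (lst : List Int), Dom_two_Max_two_Min lst → Pre_two_Max_two_Min lst → Spec_two_Max_two_Min lst (two_Max_two_Min lst)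

-- ===== LEMMAS AND PROOFS =====

def NoNan (s : XF × XF) : Prop := s.1 ≠ XF.nan ∧ s.2 ≠ XF.nan

theorem stepMax_noNan (s : XF × XF) (e : Int) (h : NoNan s) : NoNan (stepMax s e) := by
  obtain ⟨h1, h2⟩ := h
  unfold stepMax
  split_ifs <;> exact ⟨by simp_all, by simp_all⟩

theorem stepMin_noNan (s : XF × XF) (e : Int) (h : NoNan s) : NoNan (stepMin s e) := by
  obtain ⟨h1, h2⟩ := h
  unfold stepMin
  split_ifs <;> exact ⟨by simp_all, by simp_all⟩

theorem stepMax_comm (s : XF × XF) (h : NoNan s) (x y : Int) :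
    stepMax (stepMax s x) y = stepMax (stepMax s y) x := by
  obtain ⟨a, b⟩ := s
  obtain ⟨h1, h2⟩ := h
  cases a <;> cases b <;> simp_all [stepMax, XF.gtb] <;>
    split_ifs <;> simp_all [XF.gtb] <;> omega

theorem stepMin_comm (s : XF × XF) (h : NoNan s) (x y : Int) :
    stepMin (stepMin s x) y = stepMin (stepMin s y) x := by
  obtain ⟨a, b⟩ := s
  obtain ⟨h1, h2⟩ := h
  cases a <;> cases b <;> simp_all [stepMin, XF.ltb, XF.gtb] <;>
    split_ifs <;> simp_all [XF.gtb] <;> omega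

theorem foldl_perm_noNan (f : XF × XF → Int → XF × XF)
    (hpres : ∀ s e, NoNan s → NoNan (f s e))
    (hcomm : ∀ s, NoNan s → ∀ x y, f (f s x) y = f (f s y) x)
    {l₁ l₂ : List Int} (hp : l₁.Perm l₂) :
    ∀ s, NoNan s → l₁.foldl f s = l₂.foldl f s := by
  induction hp with
  | nil => intro s _; rfl
  | cons x _ ih =>
      intro s hs
      simp only [List.foldl_cons]
      exact ih _ (hpres s x hs)
  | swap x y _ =>
      intro s hs
      simp only [List.foldl_cons]
      rw [hcomm s hs]
  | trans _ _ ih₁ ih₂ =>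
      intro s hs
      rw [ih₁ s hs, ih₂ s hs]

-- after a sorted (ascending) prefix of length ≥ 2 the max-scan state is the last two entries
theorem foldMax_sorted (t : List Int) (u v : Int) (huv : u ≤ v)
    (hs : (t).Pairwise (fun a b => a ≤ b)) (hlo : ∀ z ∈ t, v ≤ z) :
    (t.foldl stepMax (XF.fin v, XF.fin u)) =
      (XF.fin ((v :: t).getLast (by simp)), XF.fin (((u :: v :: t).dropLast).getLast (by simp))) := by
  induction t generalizing u v with
  | nil => simp
  | cons z t ih =>
      have hvz : v ≤ z := hlo z (by simp)
      have hs' : t.Pairwise (fun a b => a ≤ b) := hs.tail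
      have hlo' : ∀ w ∈ t, z ≤ w := by
        intro w hw
        exact (List.pairwise_cons.mp hs).1 w hw
      have hz := ih v z hvz hs' hlo'
      by_cases hzy : z > v
      · have : stepMax (XF.fin v, XF.fin u) z = (XF.fin z, XF.fin v) := by
          simp [stepMax, XF.gtb, hzy]
        simp only [List.foldl_cons, this]
        rw [hz]
        cases t <;> simp
      · have hvz' : z = v := le_antisymm (by omega) hvz
        subst hvz'
        have : stepMax (XF.fin z, XF.fin u) z = (XF.fin z, XF.fin z) := by
          unfold stepMax
          by_cases hc : u < z
          · simp [XF.gtb, hc]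
          · have : u = z := by omega
            subst this
            simp [XF.gtb]
        simp only [List.foldl_cons, this]
        rw [hz]
        cases t <;> simp

-- after the first two entries of a sorted list the min-scan state is fixed
theorem foldMin_ge (t : List Int) (u v : Int) (huv : u ≤ v) (hlo : ∀ z ∈ t, v ≤ z) :
    t.foldl stepMin (XF.fin u, XF.fin v) = (XF.fin u, XF.fin v) := by
  induction t with
  | nil => rfl
  | cons z t ih =>
      have hvz : v ≤ z := hlo z (by simp)
      have : stepMin (XF.fin u, XF.fin v) z = (XF.fin u, XF.fin v) := by
        unfold stepMin
        have h1 : XF.ltb (XF.fin z) (XF.fin u) = false := by simp [XF.ltb, XF.gtb]; omega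
        have h2 : XF.ltb (XF.fin z) (XF.fin v) = false := by simp [XF.ltb, XF.gtb]; omega
        simp [h1, h2]
      simp only [List.foldl_cons, this]
      exact ih (fun w hw => hlo w (by simp [hw]))

theorem foldMax_sorted_full (u v : Int) (t : List Int) (huv : u ≤ v)
    (hs : (u :: v :: t).Pairwise (fun a b => a ≤ b)) :
    ((u :: v :: t).foldl stepMax (XF.ninf, XF.ninf)) =
      (XF.fin ((v :: t).getLast (by simp)), XF.fin (((u :: v :: t).dropLast).getLast (by simp))) := by
  have h1 : stepMax (XF.ninf, XF.ninf) u = (XF.fin u, XF.ninf) := by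
    simp [stepMax, XF.gtb]
  have h2 : stepMax (XF.fin u, XF.ninf) v = (XF.fin v, XF.fin u) := by
    by_cases hvu : v > u
    · simp [stepMax, XF.gtb, hvu]
    · have : v = u := by omega
      subst this
      simp [stepMax, XF.gtb]
  simp only [List.foldl_cons, h1, h2]
  exact foldMax_sorted t u v huv hs.tail.tail
    (fun z hz => (List.pairwise_cons.mp hs.tail).1 z hz)

theorem foldMin_sorted_full (u v : Int) (t : List Int) (huv : u ≤ v)
    (hs : (u :: v :: t).Pairwise (fun a b => a ≤ b)) :
    ((u :: v :: t).foldl stepMin (XF.pinf, XF.pinf)) = (XF.fin u, XF.fin v) := by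
  have h1 : stepMin (XF.pinf, XF.pinf) u = (XF.fin u, XF.pinf) := by
    simp [stepMin, XF.ltb, XF.gtb]
  have h2 : stepMin (XF.fin u, XF.pinf) v = (XF.fin u, XF.fin v) := by
    simp [stepMin, XF.ltb, XF.gtb]
    omega
  simp only [List.foldl_cons, h1, h2]
  exact foldMin_ge t u v huv (fun z hz => (List.pairwise_cons.mp hs.tail).1 z hz)

-- ===== VERDICT (by name: the statement is the Claim_ definition above) =====
theorem two_Max_two_Min_spec : Claim_equal_two_Max_two_Min := by
  intro lst _ hpre
  unfold Spec_two_Max_two_Min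
  obtain ⟨u, v, t, hs1⟩ : ∃ u v t, PySem.List.sorted lst (fun x => x) false = u :: v :: t := by
    have hlen : 2 ≤ (PySem.List.sorted lst (fun x => x) false).length := by
      rw [(PySem.List.sorted_perm lst (fun x => x) false).length_eq]; exact hpre
    match hzz : PySem.List.sorted lst (fun x => x) false, hlen with
    | u :: v :: t, _ => exact ⟨u, v, t, rfl⟩
  have hperm : (u :: v :: t).Perm lst := hs1 ▸ PySem.List.sorted_perm lst (fun x => x) false
  have hpair : (u :: v :: t).Pairwise (fun a b => a ≤ b) :=
    hs1 ▸ PySem.List.sorted_pairwise lst (fun x => x)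
  have huv : u ≤ v := (List.pairwise_cons.mp hpair).1 v (by simp)
  have hmax : lst.foldl stepMax (XF.ninf, XF.ninf) = (u :: v :: t).foldl stepMax (XF.ninf, XF.ninf) :=
    (foldl_perm_noNan stepMax stepMax_noNan stepMax_comm hperm
      (XF.ninf, XF.ninf) ⟨by simp, by simp⟩).symm
  have hmin : lst.foldl stepMin (XF.pinf, XF.pinf) = (u :: v :: t).foldl stepMin (XF.pinf, XF.pinf) :=
    (foldl_perm_noNan stepMin stepMin_noNan stepMin_comm hperm
      (XF.pinf, XF.pinf) ⟨by simp, by simp⟩).symm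
  have hmaxv := foldMax_sorted_full u v t huv hpair
  have hminv := foldMin_sorted_full u v t huv hpair
  have e1 : PySem.List.pyGet? (u :: v :: t) (-1) = some ((v :: t).getLast (by simp)) := by
    rw [PySem.List.pyGet?_neg_one, List.getLast?_eq_some_getLast (by simp), List.getLast_cons]
  have e2 : PySem.List.pyGet? (u :: v :: t) (-2)
      = some (((u :: v :: t).dropLast).getLast (by simp)) := by
    rw [PySem.List.pyGet?_neg_ofNat (u :: v :: t) 2 (by norm_num) (by simp)]
    have hlt : t.length < (u :: v :: t).length := by simp
    have : (u :: v :: t).length - 2 = t.length := by simp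
    rw [this, List.getElem?_eq_getElem hlt]
    congr 1
    rw [List.getLast_eq_getElem]
    rw [List.getElem_dropLast]
    congr 1 <;> simp
  have e3 : PySem.List.pyGet? (u :: v :: t) 0 = some u := PySem.List.pyGet?_zero_cons u (v :: t)
  have e4 : PySem.List.pyGet? (u :: v :: t) 1 = some v := by
    simp [PySem.List.pyGet?, PySem.List.pyIdx?]
  unfold two_Max_two_Min two_Max_two_Min_alt
  rw [hs1]
  simp only [hmax, hmin, hmaxv, hminv, e1, e2, e3, e4]
  simp [XF.gtb, XF.mul, XF.add]
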